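-- pv_equiv track=rewrite | github.com/Eksi123/Share | Datebase Learning/线性结构算法-排序.py | sub_sort3
-- ===== SOURCE A (Python) =====
-- def sub_sort3(List,start,step):
--     for i in range(start+step,len(List),step):
--         value=List[i]
--         index=i-step
--         while index>=start and List[index]>value:
--             List[index+step]=List[index]
--             index=index-step
--         List[index+step]=value
--     return List
-- ===== SOURCE B (Python) =====
-- def _merge(a, b):
--     out = []
--     i = 0
--     j = 0
--     while i < len(a) and j < len(b):
--         if b[j] < a[i]:
--             out.append(b[j])
--             j += 1
--         else:
--             out.append(a[i])
--             i += 1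
--     out.extend(a[i:])
--     out.extend(b[j:])
--     return out
--
--
-- def _merge_sort(xs):
--     if len(xs) <= 1:
--         return xs
--     mid = len(xs) // 2
--     return _merge(_merge_sort(xs[:mid]), _merge_sort(xs[mid:]))
--
--
-- def sub_sort3(List, start, step):
--     idxs = range(start, len(List), step)
--     vals = _merge_sort([List[i] for i in idxs])
--     for i, v in zip(idxs, vals):
--         List[i] = v
--     return List
-- ===== Notes on version B (the rewrite author's own statement) =====
-- stated objective: alternative
-- what changed: Replaces the in-place element-shifting gap insertion sort with a different algorithm: extract the strided values at range(start, len(List), step), sort them with a recursive stable merge sort, and write them back to the same positions.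
-- outside the precondition, e.g. on sub_sort3([1, 2, 3], -1, 1): A returns [3, 2, 1], B returns [2, 3, 3]; on sub_sort3([1, 2, 3], 5, -2): A returns [1, 2, 3], B raises IndexError
import Mathlib
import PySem

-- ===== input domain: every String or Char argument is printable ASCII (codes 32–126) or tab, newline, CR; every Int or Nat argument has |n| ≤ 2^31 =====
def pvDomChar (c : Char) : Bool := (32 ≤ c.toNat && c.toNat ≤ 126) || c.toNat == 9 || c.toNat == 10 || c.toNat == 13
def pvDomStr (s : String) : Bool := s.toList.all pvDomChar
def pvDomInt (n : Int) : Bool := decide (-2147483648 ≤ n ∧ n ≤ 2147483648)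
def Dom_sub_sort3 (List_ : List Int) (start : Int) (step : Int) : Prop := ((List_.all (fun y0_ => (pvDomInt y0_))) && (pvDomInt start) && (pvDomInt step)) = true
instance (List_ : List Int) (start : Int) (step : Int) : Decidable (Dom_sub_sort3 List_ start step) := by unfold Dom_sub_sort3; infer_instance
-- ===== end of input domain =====

-- B replaces A's in-place gap insertion sort by a different algorithm: extract the
-- strided values, stable merge sort, write back; both mutate the Python list in place
-- and return it — the equivalence proved here is about the return value.

-- ===== PORT A =====
-- the inner 'while index>=start and List[index]>value' shifting loop of A
-- (fuel-bounded structural recursion; fuel len(List)+1 is enough whenever the loop terminates inside Pre_)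
def subA_inner (s d v : Int) (M : List Int) (index : Int) (fuel : Nat) : List Int × Int :=
  match fuel with
  | 0 => (M, index)
  | Nat.succ f =>
    if s ≤ index then
      match PySem.List.pyGet? M index with
      | some a =>
        if v < a then
          subA_inner s d v (PySem.List.pySetD M (index + d) a) (index - d) f
        else (M, index)
      | none => (M, index)   -- Python raises IndexError here; outside Pre_
    else (M, index)

-- one outer iteration of A: value=List[i]; the while loop; List[index+step]=value
def subA_body (s d : Int) (M : List Int) (i : Int) : List Int :=
  match PySem.List.pyGet? M i with
  | none => M               -- Python raises IndexError here; outside Pre_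
  | some v =>
    let r := subA_inner s d v M (i - d) (M.length + 1)
    PySem.List.pySetD r.1 (r.2 + d) v

def sub_sort3 (List_ : List Int) (start : Int) (step : Int) : List Int :=
  (PySem.List.pyRange (start + step) (List_.length : Int) step).foldl (subA_body start step) List_

-- ===== PORT B =====
-- stable merge of Source B's _merge (left element taken on ties)
def mergeB : List Int → List Int → List Int
  | [], b => b
  | a :: as_, [] => a :: as_
  | x :: xs, y :: ys =>
    if y < x then y :: mergeB (x :: xs) ys else x :: mergeB xs (y :: ys)
termination_by a b => a.length + b.length

-- Source B's _merge_sort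
def msortB (xs : List Int) : List Int :=
  if h : xs.length ≤ 1 then xs
  else
    mergeB (msortB (xs.take (xs.length / 2))) (msortB (xs.drop (xs.length / 2)))
termination_by xs.length
decreasing_by
  · simp only [List.length_take]; omega
  · simp only [List.length_drop]; omega

def sub_sort3_alt (List_ : List Int) (start : Int) (step : Int) : List Int :=
  let idxs := PySem.List.pyRange start (List_.length : Int) step
  let vals := msortB (idxs.map (fun i => PySem.List.pyGetD List_ i 0))
  (idxs.zip vals).foldl (fun M p => PySem.List.pySetD M p.1 p.2) List_

-- ===== PRECONDITION & SPEC =====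
-- Pre_ excludes: step == 0 (A raises ValueError); negative start with positive step
-- (A's value there comes from Python's negative-index wraparound, an accident of the
-- in-place implementation, and B wraps differently or raises); and start > len(List_)
-- with negative step (A returns the list unchanged only while start+step ≤ len, where
-- B's range(start, len, step) is nonempty and B raises IndexError).
def Pre_sub_sort3 (List_ : List Int) (start : Int) (step : Int) : Prop :=
  (1 ≤ step ∧ 0 ≤ start) ∨ (step ≤ -1 ∧ start ≤ (List_.length : Int))
instance (List_ : List Int) (start : Int) (step : Int) : Decidable (Pre_sub_sort3 List_ start step) := by
  unfold Pre_sub_sort3; infer_instance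

def pvWitness_sub_sort3 : List Int × Int × Int := ([3, 1, 2], 0, 1)

def Spec_sub_sort3 (List_ : List Int) (start : Int) (step : Int) (out : List Int) : Prop := out = sub_sort3_alt List_ start step
instance (List_ : List Int) (start : Int) (step : Int) (out : List Int) : Decidable (Spec_sub_sort3 List_ start step out) := by unfold Spec_sub_sort3; infer_instance

-- ===== CLAIM (what is proved, stated in full; the proofs are below) =====
def Claim_equal_sub_sort3 : Prop := ∀ (List_ : List Int) (start : Int) (step : Int), Dom_sub_sort3 List_ start step → Pre_sub_sort3 List_ start step → Spec_sub_sort3 List_ start step (sub_sort3 List_ start step)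

-- ===== LEMMAS AND PROOFS =====

-- abstract machinery: write-back at Nat positions, A's inner loop and one outer pass
-- on the subsequence level, the strided positions, and the length of a positive-step range
def wbp : List Nat → List Int → List Int → List Int
  | p :: ps, v :: vs, M => wbp ps vs (M.set p v)
  | _, _, M => M

theorem wbp_nil_vs (ps : List Nat) (M : List Int) : wbp ps [] M = M := by
  cases ps <;> rfl

theorem wbp_length (ps : List Nat) (vs : List Int) (M : List Int) :
    (wbp ps vs M).length = M.length := by
  induction ps generalizing vs M with
  | nil => rfl
  | cons p ps ih =>
    cases vs with
    | nil => rfl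
    | cons v vs => simp [wbp, ih]

theorem wbp_getElem?_not_mem (ps : List Nat) (vs : List Int) (M : List Int) (j : Nat)
    (hj : j ∉ ps) : (wbp ps vs M)[j]? = M[j]? := by
  induction ps generalizing vs M with
  | nil => rfl
  | cons p ps ih =>
    cases vs with
    | nil => rfl
    | cons v vs =>
      simp only [List.mem_cons, not_or] at hj
      rw [wbp, ih vs (M.set p v) hj.2, List.getElem?_set_ne (by omega : p ≠ j)]

theorem wbp_getElem?_at (ps : List Nat) (vs : List Int) (M : List Int) (k : Nat)
    (hmono : ps.Pairwise (· < ·)) (hk : k < ps.length) (hv : k < vs.length)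
    (hb : ps[k] < M.length) : (wbp ps vs M)[ps[k]]? = some vs[k] := by
  induction ps generalizing vs M k with
  | nil => simp at hk
  | cons p ps ih =>
    cases vs with
    | nil => simp at hv
    | cons v vs =>
      rcases List.pairwise_cons.mp hmono with ⟨hlt, hmono'⟩
      cases k with
      | zero =>
        have hnm : p ∉ ps := fun h => absurd (hlt p h) (lt_irrefl p)
        simp only [List.getElem_cons_zero] at hb ⊢
        rw [wbp, wbp_getElem?_not_mem ps vs _ p hnm]
        simp [hb]
      | succ k =>
        simp only [List.getElem_cons_succ] at hb ⊢
        rw [wbp]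
        rw [ih vs (M.set p v) k hmono' (by simpa using hk) (by simpa using hv) (by simpa using hb)]

theorem wbp_set_not_mem (ps : List Nat) (vs : List Int) (M : List Int) (j : Nat) (x : Int)
    (hj : j ∉ ps) : (wbp ps vs M).set j x = wbp ps vs (M.set j x) := by
  induction ps generalizing vs M with
  | nil => rfl
  | cons p ps ih =>
    cases vs with
    | nil => rfl
    | cons v vs =>
      simp only [List.mem_cons, not_or] at hj
      rw [wbp, wbp, ih vs (M.set p v) hj.2, List.set_comm _ _ (by omega : j ≠ p)]

theorem wbp_set_at (ps : List Nat) (vs : List Int) (M : List Int) (k : Nat) (x : Int)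
    (hmono : ps.Pairwise (· < ·)) (hk : k < ps.length) (hv : k < vs.length) :
    (wbp ps vs M).set ps[k] x = wbp ps (vs.set k x) M := by
  induction ps generalizing vs M k with
  | nil => simp at hk
  | cons p ps ih =>
    cases vs with
    | nil => simp at hv
    | cons v vs =>
      rcases List.pairwise_cons.mp hmono with ⟨hlt, hmono'⟩
      cases k with
      | zero =>
        have hnm : p ∉ ps := fun h => absurd (hlt p h) (lt_irrefl p)
        simp only [List.getElem_cons_zero]
        rw [wbp, wbp_set_not_mem ps vs _ p _ hnm, List.set_set]
        rfl
      | succ k =>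
        simp only [List.getElem_cons_succ]
        rw [wbp, ih vs (M.set p v) k hmono' (by simpa using hk) (by simpa using hv)]
        rfl

theorem wbp_self (ps : List Nat) (M : List Int) :
    wbp ps (ps.map (fun p => M.getD p 0)) M = M := by
  induction ps generalizing M with
  | nil => rfl
  | cons p ps ih =>
    rw [List.map_cons, wbp]
    by_cases hb : p < M.length
    · rw [List.getD_eq_getElem _ _ hb, List.set_getElem_self]
      exact ih M
    · rw [List.set_eq_of_length_le (by omega)]
      exact ih M
def insRev : List Int → Int → List Int → List Int
  | [], v, acc => v :: acc
  | a :: ru, v, acc => if v < a then insRev ru v (a :: acc) else (a :: ru).reverse ++ v :: acc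

def passA (w : List Int) (t : Nat) : List Int :=
  insRev (w.take t).reverse (w.getD t 0) [] ++ w.drop (t + 1)

theorem insRev_perm (ru : List Int) (v : Int) (acc : List Int) :
    (insRev ru v acc).Perm (v :: (ru.reverse ++ acc)) := by
  induction ru generalizing acc with
  | nil => simp [insRev]
  | cons a ru ih =>
    rw [insRev]
    split
    · simpa [List.append_assoc] using ih (a :: acc)
    · simpa [List.append_assoc] using (List.perm_middle (a := v) (l₁ := ru.reverse ++ [a]) (l₂ := acc))

theorem insRev_sorted (ru : List Int) (v : Int) (acc : List Int)
    (h1 : (ru.reverse ++ acc).Pairwise (· ≤ ·)) (h2 : ∀ x ∈ acc, v ≤ x) :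
    (insRev ru v acc).Pairwise (· ≤ ·) := by
  induction ru generalizing acc with
  | nil => exact List.pairwise_cons.mpr ⟨h2, by simpa using h1⟩
  | cons a ru ih =>
    rw [insRev]
    split
    · rename_i hva
      refine ih (a :: acc) (by simpa [List.append_assoc] using h1) ?_
      intro x hx
      rcases List.mem_cons.mp hx with rfl | hx
      · exact le_of_lt hva
      · exact h2 x hx
    · rename_i hva'
      have hva : a ≤ v := not_lt.mp hva'
      have h1' : (ru.reverse ++ (a :: acc)).Pairwise (· ≤ ·) := by
        simpa [List.append_assoc] using h1
      have : (a :: ru).reverse ++ v :: acc = ru.reverse ++ (a :: v :: acc) := by simp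
      rw [this, List.pairwise_append] at *
      obtain ⟨hr, hav, hcross⟩ := h1'
      refine ⟨hr, ?_, ?_⟩
      · rw [List.pairwise_cons] at hav ⊢
        refine ⟨?_, ?_⟩
        · intro y hy
          rcases List.mem_cons.mp hy with rfl | hy
          · exact hva
          · exact hav.1 y hy
        · exact List.pairwise_cons.mpr ⟨h2, hav.2⟩
      · intro x hx y hy
        rcases List.mem_cons.mp hy with rfl | hy
        · exact hcross x hx y (List.mem_cons_self)
        · rcases List.mem_cons.mp hy with rfl | hy
          · exact le_trans (hcross x hx a List.mem_cons_self) hva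
          · exact hcross x hx y (List.mem_cons_of_mem a hy)

theorem insRev_length (ru : List Int) (v : Int) (acc : List Int) :
    (insRev ru v acc).length = ru.length + 1 + acc.length := by
  have := (insRev_perm ru v acc).length_eq
  simp at this
  simp [this]; omega

theorem passA_perm (w : List Int) (t : Nat) (ht : t < w.length) :
    (passA w t).Perm w := by
  have hw := List.take_append_drop t w
  rw [List.drop_eq_getElem_cons ht] at hw
  unfold passA
  rw [List.getD_eq_getElem _ _ ht]
  have p2 : (insRev (List.take t w).reverse w[t] [] ++ List.drop (t+1) w).Perm
      ((w[t] :: List.take t w) ++ List.drop (t+1) w) :=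
    List.Perm.append_right _ (by simpa using insRev_perm (List.take t w).reverse w[t] [])
  refine p2.trans ?_
  have p3 := (List.perm_middle (a := w[t]) (l₁ := List.take t w) (l₂ := List.drop (t+1) w)).symm
  rw [hw] at p3
  simpa using p3

theorem passA_length (w : List Int) (t : Nat) (ht : t < w.length) :
    (passA w t).length = w.length := (passA_perm w t ht).length_eq

theorem passA_take_sorted (w : List Int) (t : Nat) (ht : t < w.length)
    (hs : (w.take t).Pairwise (· ≤ ·)) :
    ((passA w t).take (t + 1)).Pairwise (· ≤ ·) := by
  unfold passA
  have hlen : (insRev (w.take t).reverse (w.getD t 0) []).length = t + 1 := by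
    rw [insRev_length]; simp; omega
  rw [List.take_append_of_le_length (by omega), ← hlen, List.take_length]
  exact insRev_sorted _ _ _ (by simpa using hs) (by simp)
theorem mergeB_perm (a b : List Int) : (mergeB a b).Perm (a ++ b) := by
  fun_induction mergeB with
  | case1 => simp
  | case2 => simp
  | case3 x xs y ys h ih =>
    refine (ih.cons y).trans ?_
    simpa using (List.perm_middle (a := y) (l₁ := x :: xs) (l₂ := ys)).symm
  | case4 x xs y ys h ih => simpa using ih.cons x

theorem mergeB_sorted (a b : List Int) (ha : a.Pairwise (· ≤ ·)) (hb : b.Pairwise (· ≤ ·)) :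
    (mergeB a b).Pairwise (· ≤ ·) := by
  fun_induction mergeB with
  | case1 => exact hb
  | case2 => exact ha
  | case3 x xs y ys h ih =>
    rw [List.pairwise_cons] at hb ⊢
    refine ⟨?_, ih ha hb.2⟩
    intro z hz
    have := (mergeB_perm (x :: xs) ys).mem_iff.mp hz
    rcases List.mem_append.mp this with hz' | hz'
    · rcases List.mem_cons.mp hz' with rfl | hz'
      · exact le_of_lt h
      · exact le_trans (le_of_lt h) (List.rel_of_pairwise_cons ha hz')
    · exact hb.1 z hz'
  | case4 x xs y ys h ih =>
    rw [List.pairwise_cons] at ha ⊢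
    refine ⟨?_, ih ha.2 hb⟩
    intro z hz
    have := (mergeB_perm xs (y :: ys)).mem_iff.mp hz
    rcases List.mem_append.mp this with hz' | hz'
    · exact ha.1 z hz'
    · rcases List.mem_cons.mp hz' with rfl | hz'
      · exact not_lt.mp h
      · exact le_trans (not_lt.mp h) (List.rel_of_pairwise_cons hb hz')

theorem msortB_perm (xs : List Int) : (msortB xs).Perm xs := by
  fun_induction msortB with
  | case1 xs h => exact List.Perm.refl xs
  | case2 xs h ih1 ih2 =>
    refine (mergeB_perm _ _).trans ?_
    refine ((ih1.append ih2).trans ?_)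
    rw [List.take_append_drop]

theorem msortB_sorted (xs : List Int) : (msortB xs).Pairwise (· ≤ ·) := by
  fun_induction msortB with
  | case1 xs h =>
    match xs, h with
    | [], _ => simp
    | [x], _ => simp
  | case2 xs h ih1 ih2 => exact mergeB_sorted _ _ ih1 ih2

def mcnt (s d : Int) (n : Nat) : Nat :=
  if s < (n : Int) then (((n : Int) - s + d - 1) / d).toNat else 0

def posns (s d : Int) (m : Nat) : List Nat := (List.range m).map (fun k : Nat => (s + d * (k : Int)).toNat)

theorem pyRange_pos_eq (s d : Int) (n : Nat) (hd : 0 < d) :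
    PySem.List.pyRange s (n : Int) d = (List.range (mcnt s d n)).map (fun k : Nat => s + d * (k : Int)) := by
  rw [PySem.List.pyRange_of_pos _ _ hd]; rfl

theorem mcnt_mem_bound (s d : Int) (n : Nat) (hd : 0 < d) (k : Nat) (hk : k < mcnt s d n) :
    s ≤ s + d * (k : Int) ∧ s + d * (k : Int) < (n : Int) := by
  have hmem : s + d * (k : Int) ∈ PySem.List.pyRange s (n : Int) d := by
    rw [pyRange_pos_eq s d n hd]
    exact List.mem_map.mpr ⟨k, List.mem_range.mpr hk, rfl⟩
  have := (PySem.List.mem_pyRange_iff_of_pos hd _).mp hmem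
  exact ⟨this.1, this.2.1⟩

theorem mcnt_shift (s d : Int) (n : Nat) (hd : 0 < d) :
    mcnt (s + d) d n = mcnt s d n - 1 := by
  unfold mcnt
  by_cases hsn : s < (n : Int)
  · by_cases hsd : s + d < (n : Int)
    · simp only [hsn, hsd, if_true]
      have he : (n : Int) - s + d - 1 = ((n : Int) - (s + d) + d - 1) + 1 * d := by ring
      rw [he, Int.add_mul_ediv_right _ _ (ne_of_gt hd)]
      have hy : 0 ≤ ((n : Int) - (s + d) + d - 1) / d := by
        apply Int.ediv_nonneg _ (le_of_lt hd); omega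
      omega
    · simp only [hsn, hsd, if_true, if_false]
      have hlt : ((n : Int) - s + d - 1) / d < 2 := by
        rw [Int.ediv_lt_iff_lt_mul hd]; omega
      omega
  · have hsd : ¬ s + d < (n : Int) := by omega
    simp [hsn, hsd]

theorem mcnt_le (s d : Int) (n : Nat) (hs : 0 ≤ s) (hd : 1 ≤ d) : mcnt s d n ≤ n := by
  by_contra hc
  push Not at hc
  have := (mcnt_mem_bound s d n (by omega) n hc).2
  have hn : (n : Int) ≤ d * (n : Int) := by
    nlinarith [Int.natCast_nonneg n]
  omega

theorem posns_length (s d : Int) (m : Nat) : (posns s d m).length = m := by simp [posns]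

theorem posns_getElem (s d : Int) (m k : Nat) (hk : k < m) :
    (posns s d m)[k]'(by simp [posns]; omega) = (s + d * (k : Int)).toNat := by
  simp [posns]

theorem posns_pairwise (s d : Int) (m : Nat) (hs : 0 ≤ s) (hd : 1 ≤ d) :
    (posns s d m).Pairwise (· < ·) := by
  unfold posns
  rw [List.pairwise_map]
  refine List.Pairwise.imp_of_mem ?_ (List.pairwise_lt_range)
  intro a b _ _ hab
  have h1 : 0 ≤ s + d * (a : Int) := by positivity
  have h2 : s + d * (a : Int) < s + d * (b : Int) := by
    have : d * (a : Int) < d * (b : Int) := by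
      apply mul_lt_mul_of_pos_left (by exact_mod_cast hab) (by omega)
    omega
  omega

theorem posns_bound (s d : Int) (n m k : Nat) (hs : 0 ≤ s) (hd : 1 ≤ d)
    (hmn : ∀ j, j < m → s + d * (j : Int) < (n : Int))
    (hk : k < m) : (posns s d m)[k]'(by simp [posns]; omega) < n := by
  rw [posns_getElem s d m k hk]
  have h1 := hmn k hk
  have h2 : 0 ≤ d * (k : Int) := by positivity
  omega

-- the inner while loop of A, performed under a write-back view,
-- computes insRev on the subsequence level
theorem innerSim (s d : Int) (hs : 0 ≤ s) (hd : 1 ≤ d) (L : List Int) (m : Nat)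
    (hm : ∀ k, k < m → s + d * (k : Int) < (L.length : Int))
    (rest : List Int) (v : Int) :
    ∀ (ru : List Int) (h : Int) (acc : List Int) (fuel : Nat),
      ru.length + 1 + acc.length + rest.length ≤ m →
      ru.length < fuel →
      (let r := subA_inner s d v (wbp (posns s d m) (ru.reverse ++ h :: acc ++ rest) L)
          (s + d * (ru.length : Int) - d) fuel
       PySem.List.pySetD r.1 (r.2 + d) v) = wbp (posns s d m) (insRev ru v acc ++ rest) L := by
  have hmono := posns_pairwise s d m hs hd
  have hlenps := posns_length s d m
  intro ru
  induction ru with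
  | nil =>
    intro h acc fuel hw hfuel
    cases fuel with
    | zero => omega
    | succ f =>
      have hm1 : 0 < m := by have := hw; simp at this; omega
      simp only [List.length_nil, Nat.cast_zero, mul_zero, add_zero, List.reverse_nil,
        List.nil_append]
      rw [subA_inner]
      have hcond : ¬ s ≤ s - d := by omega
      simp only [hcond, if_false]
      have hsd : s - d + d = s := by ring
      rw [hsd, PySem.List.pySetD_of_nonneg _ _ hs]
      have hps0 : (posns s d m)[0]'(by omega) = s.toNat := by
        rw [posns_getElem s d m 0 hm1]; norm_num
      rw [← hps0, wbp_set_at _ _ _ _ _ hmono (by omega) (by simp)]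
      simp [insRev]
  | cons a ru ih =>
    intro h acc fuel hw hfuel
    cases fuel with
    | zero => simp at hfuel
    | succ f =>
      have hlen1 : ru.length + 1 < m := by simp at hw; omega
      have hlen0 : ru.length < m := by omega
      have hidx : s + d * (((a :: ru).length : Nat) : Int) - d = s + d * (ru.length : Int) := by
        simp only [List.length_cons]; push_cast; ring
      have hnn : (0:Int) ≤ d * (ru.length : Int) := by positivity
      rw [hidx, subA_inner]
      have hcond : s ≤ s + d * (ru.length : Int) := by omega
      simp only [hcond, if_true]
      -- the element read is a
      have hw' : (a :: ru).reverse ++ h :: acc ++ rest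
          = ru.reverse ++ [a] ++ (h :: acc ++ rest) := by simp
      have hget : PySem.List.pyGet? (wbp (posns s d m) ((a :: ru).reverse ++ h :: acc ++ rest) L)
          (s + d * (ru.length : Int)) = some a := by
        rw [PySem.List.pyGet?_of_nonneg _ (by omega)]
        have hpsl : (s + d * (ru.length : Int)).toNat = (posns s d m)[ru.length]'(by omega) := by
          rw [posns_getElem s d m ru.length hlen0]
        rw [hpsl, wbp_getElem?_at _ _ _ _ hmono (by omega)
          (by simp only [List.length_append, List.length_reverse, List.length_cons]; omega)
          (posns_bound s d L.length m ru.length hs hd hm hlen0)]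
        congr 1
        have h1 : ru.length < ((a :: ru).reverse ++ (h :: acc)).length := by simp
        have h2 : ru.length < ((a :: ru).reverse).length := by simp
        have e1 : (((a :: ru).reverse ++ (h :: acc)) ++ rest)[ru.length]'(by simp) =
            ((a :: ru).reverse ++ (h :: acc))[ru.length]'h1 :=
          List.getElem_append_left (bs := rest) h1
        have e2 : ((a :: ru).reverse ++ (h :: acc))[ru.length]'h1 =
            ((a :: ru).reverse)[ru.length]'h2 := List.getElem_append_left (bs := h :: acc) h2
        have e3 : ((a :: ru).reverse)[ru.length]'h2 =
            (ru.reverse ++ [a])[ru.length]'(by simp) :=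
          List.getElem_of_eq (by simp) h2
        rw [e1, e2, e3]
        exact List.getElem_concat_length (by simp) (by simp)
      rw [hget]
      -- the write position for both branches is ps[ru.length + 1]
      have hps1 : (s + d * (ru.length : Int) + d).toNat = (posns s d m)[ru.length + 1]'(by omega) := by
        rw [posns_getElem s d m (ru.length + 1) hlen1]
        congr 1
        push_cast; ring
      by_cases hva : v < a
      · simp only [hva, if_true]
        rw [PySem.List.pySetD_of_nonneg
            (wbp (posns s d m) ((a :: ru).reverse ++ h :: acc ++ rest) L)
            (i := s + d * (ru.length : Int) + d) a (by omega), hps1,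
          wbp_set_at _ _ _ _ _ hmono (by omega)
            (by simp only [List.length_append, List.length_reverse, List.length_cons]; omega)]
        have hset : ((a :: ru).reverse ++ h :: acc ++ rest).set (ru.length + 1) a
            = ru.reverse ++ a :: (a :: acc) ++ rest := by
          simp [List.append_assoc]
        rw [hset]
        have := ih a (a :: acc) f (by simp at hw ⊢; omega) (by simp only [List.length_cons] at hfuel; omega)
        simp only at this
        rw [this]
        rw [insRev]
        simp [hva]
      · simp only [hva, if_false]
        rw [PySem.List.pySetD_of_nonneg
            (wbp (posns s d m) ((a :: ru).reverse ++ h :: acc ++ rest) L)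
            (i := s + d * (ru.length : Int) + d) v (by omega), hps1,
          wbp_set_at _ _ _ _ _ hmono (by omega)
            (by simp only [List.length_append, List.length_reverse, List.length_cons]; omega)]
        have hset : ((a :: ru).reverse ++ h :: acc ++ rest).set (ru.length + 1) v
            = (insRev (a :: ru) v acc) ++ rest := by
          rw [insRev]
          simp [hva, List.append_assoc]
        rw [hset]

-- the outer for loop of A, under the write-back view, folds passA on the subsequence level
theorem outerSim (s d : Int) (hs : 0 ≤ s) (hd : 1 ≤ d) (L : List Int) (m : Nat)
    (hm : ∀ k, k < m → s + d * (k : Int) < (L.length : Int)) (hmn : m ≤ L.length) :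
    ∀ (r t0 : Nat) (w : List Int), 1 ≤ t0 → t0 + r = m → w.length = m →
      ((List.range r).map (fun k : Nat => s + d * ((t0 + k : Nat) : Int))).foldl (subA_body s d)
          (wbp (posns s d m) w L)
        = wbp (posns s d m) (((List.range r).map (fun k : Nat => t0 + k)).foldl passA w) L := by
  have hmono := posns_pairwise s d m hs hd
  have hlenps := posns_length s d m
  intro r
  induction r with
  | zero => intro t0 w _ _ _; simp
  | succ r ih =>
    intro t0 w ht0 hr hwlen
    have hsplit1 : (List.range (r + 1)).map (fun k : Nat => s + d * ((t0 + k : Nat) : Int))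
        = (s + d * (t0 : Int)) :: (List.range r).map
            (fun k : Nat => s + d * (((t0 + 1) + k : Nat) : Int)) := by
      rw [List.range_succ_eq_map]
      simp only [List.map_cons, List.map_map]
      refine congrArg₂ _ (by norm_num) (List.map_congr_left ?_)
      intro k _
      simp only [Function.comp]
      congr 2
      omega
    have hsplit2 : (List.range (r + 1)).map (fun k : Nat => t0 + k)
        = t0 :: (List.range r).map (fun k : Nat => (t0 + 1) + k) := by
      rw [List.range_succ_eq_map]
      simp only [List.map_cons, List.map_map]
      refine congrArg₂ _ (by omega) (List.map_congr_left ?_)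
      intro k _
      simp [Function.comp]; omega
    rw [hsplit1, hsplit2]
    simp only [List.foldl_cons]
    have ht0m : t0 < m := by omega
    -- one outer iteration is passA
    have hbody : subA_body s d (wbp (posns s d m) w L) (s + d * (t0 : Int))
        = wbp (posns s d m) (passA w t0) L := by
      unfold subA_body
      have hget : PySem.List.pyGet? (wbp (posns s d m) w L) (s + d * (t0 : Int))
          = some (w[t0]'(by omega)) := by
        have hnn : (0:Int) ≤ d * (t0 : Int) := by positivity
        rw [PySem.List.pyGet?_of_nonneg _ (by omega)]
        have hpsl : (s + d * (t0 : Int)).toNat = (posns s d m)[t0]'(by omega) := by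
          rw [posns_getElem s d m t0 ht0m]
        rw [hpsl, wbp_getElem?_at _ _ _ _ hmono (by omega) (by omega)
          (posns_bound s d L.length m t0 hs hd hm ht0m)]
      rw [hget]
      have hfuel : (wbp (posns s d m) w L).length + 1 = L.length + 1 := by
        rw [wbp_length]
      rw [hfuel]
      have hdecomp : w = (w.take t0).reverse.reverse ++ (w[t0]'(by omega) :: []) ++ w.drop (t0 + 1) := by
        have e := List.take_append_drop t0 w
        rw [List.drop_eq_getElem_cons (show t0 < w.length by omega)] at e
        simp only [List.reverse_reverse, List.append_assoc, List.singleton_append]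
        exact e.symm
      have hidx : s + d * (t0 : Int) - d = s + d * (((w.take t0).reverse.length : Nat) : Int) - d := by
        congr 2
        simp
        omega
      have := innerSim s d hs hd L m hm (w.drop (t0 + 1)) (w[t0]'(by omega))
        ((w.take t0).reverse) (w[t0]'(by omega)) [] (L.length + 1)
        (by simp; omega) (by simp; omega)
      simp only at this
      rw [hidx]
      calc PySem.List.pySetD
            (subA_inner s d (w[t0]'(by omega)) (wbp (posns s d m) w L)
              (s + d * (((w.take t0).reverse.length : Nat) : Int) - d) (L.length + 1)).1
            ((subA_inner s d (w[t0]'(by omega)) (wbp (posns s d m) w L)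
              (s + d * (((w.take t0).reverse.length : Nat) : Int) - d) (L.length + 1)).2 + d)
            (w[t0]'(by omega))
          = wbp (posns s d m)
              (insRev ((w.take t0).reverse) (w[t0]'(by omega)) [] ++ w.drop (t0 + 1)) L := by
            rw [show wbp (posns s d m) w L
                = wbp (posns s d m) ((w.take t0).reverse.reverse ++
                    (w[t0]'(by omega) :: []) ++ w.drop (t0 + 1)) L from by rw [← hdecomp]]
            exact this
        _ = wbp (posns s d m) (passA w t0) L := by
            unfold passA
            rw [List.getD_eq_getElem _ _ (by omega)]
    rw [hbody]
    exact ih (t0 + 1) (passA w t0) (by omega) (by omega) (by rw [passA_length w t0 (by omega)]; omega)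

-- repeated passA sorts: permutation + sortedness invariant
theorem absInv (r : Nat) : ∀ (t0 : Nat) (w : List Int), 1 ≤ t0 → t0 + r = w.length →
    (w.take t0).Pairwise (· ≤ ·) →
    (((List.range r).map (fun k : Nat => t0 + k)).foldl passA w).Perm w ∧
    (((List.range r).map (fun k : Nat => t0 + k)).foldl passA w).Pairwise (· ≤ ·) := by
  induction r with
  | zero =>
    intro t0 w ht0 hlen hsort
    simp only [List.range_zero, List.map_nil, List.foldl_nil]
    refine ⟨List.Perm.refl w, ?_⟩
    rw [← List.take_of_length_le (le_of_eq hlen.symm)]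
    exact hsort
  | succ r ih =>
    intro t0 w ht0 hlen hsort
    have hsplit : (List.range (r + 1)).map (fun k : Nat => t0 + k)
        = t0 :: (List.range r).map (fun k : Nat => (t0 + 1) + k) := by
      rw [List.range_succ_eq_map]
      simp only [List.map_cons, List.map_map]
      refine congrArg₂ _ (by omega) (List.map_congr_left ?_)
      intro k _
      simp [Function.comp]; omega
    rw [hsplit]
    simp only [List.foldl_cons]
    have ht : t0 < w.length := by omega
    have h1 := passA_perm w t0 ht
    have h2 := passA_take_sorted w t0 ht hsort
    have h3 := passA_length w t0 ht
    obtain ⟨p, q⟩ := ih (t0 + 1) (passA w t0) (by omega) (by omega) h2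
    exact ⟨p.trans h1, q⟩

-- B's zip/foldl write-back equals wbp
theorem zip_foldl_wbp (idxs : List Int) : ∀ (vs : List Int) (M : List Int),
    (∀ i ∈ idxs, 0 ≤ i) →
    (idxs.zip vs).foldl (fun M p => PySem.List.pySetD M p.1 p.2) M
      = wbp (idxs.map Int.toNat) vs M := by
  induction idxs with
  | nil => intro vs M _; cases vs <;> rfl
  | cons i idxs ih =>
    intro vs M hnn
    cases vs with
    | nil => simp [wbp_nil_vs]
    | cons v vs =>
      simp only [List.zip_cons_cons, List.foldl_cons, List.map_cons]
      rw [ih vs _ (fun j hj => hnn j (List.mem_cons_of_mem i hj)),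
        PySem.List.pySetD_of_nonneg _ _ (hnn i List.mem_cons_self)]
      rfl

theorem pyRange_neg_empty (a b st : Int) (hst : st < 0) (hab : a ≤ b) :
    PySem.List.pyRange a b st = [] := by
  have h1 : st ≠ 0 := by omega
  have h2 : ¬ 0 < st := by omega
  have h3 : ¬ b < a := by omega
  simp [PySem.List.pyRange, h1, h2, h3]

theorem take_one_pairwise (E : List Int) : (E.take 1).Pairwise (· ≤ ·) := by
  cases E <;> simp

-- ===== VERDICT (by name: the statement is the Claim_ definition above) =====
theorem sub_sort3_spec : Claim_equal_sub_sort3 := by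
  unfold Claim_equal_sub_sort3
  intro L start step _ hpre
  unfold Spec_sub_sort3
  rcases hpre with ⟨hd, hs⟩ | ⟨hd, hsn⟩
  · -- positive step, nonnegative start
    have hd0 : (0:Int) < step := by omega
    set n := L.length with hn
    set m := mcnt start step n with hmdef
    have hm : ∀ k, k < m → start + step * (k : Int) < (n : Int) :=
      fun k hk => (mcnt_mem_bound start step n hd0 k hk).2
    have hmn : m ≤ n := mcnt_le start step n hs hd
    have hps := posns_length start step m
    -- B in write-back form
    have hE : (PySem.List.pyRange start (n : Int) step).map
          (fun i => PySem.List.pyGetD L i 0)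
        = (posns start step m).map (fun p => L.getD p 0) := by
      rw [pyRange_pos_eq start step n hd0]
      unfold posns
      rw [List.map_map, List.map_map]
      refine List.map_congr_left ?_
      intro k _
      simp only [Function.comp]
      rw [PySem.List.pyGetD_of_nonneg _ _ (by positivity)]
    have hBwb : sub_sort3_alt L start step
        = wbp (posns start step m)
            (msortB ((posns start step m).map (fun p => L.getD p 0))) L := by
      unfold sub_sort3_alt
      simp only
      rw [zip_foldl_wbp _ _ _ ?hnn]
      case hnn =>
        intro i hi
        rw [pyRange_pos_eq start step n hd0] at hi
        obtain ⟨k, -, rfl⟩ := List.mem_map.mp hi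
        positivity
      rw [hE]
      congr 1
      rw [pyRange_pos_eq start step n hd0]
      unfold posns
      rw [List.map_map, ← hmdef]
      simp [Function.comp]
    by_cases hm0 : m = 0
    · -- no strided positions at all: both sides return the list unchanged
      have hA : PySem.List.pyRange (start + step) (n : Int) step = [] := by
        rw [pyRange_pos_eq (start + step) step n hd0, mcnt_shift start step n hd0,
          ← hmdef, hm0]
        simp
      have hB : PySem.List.pyRange start (n : Int) step = [] := by
        rw [pyRange_pos_eq start step n hd0, ← hmdef, hm0]
        simp
      rw [hBwb, hm0]
      unfold sub_sort3
      rw [hA]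
      simp only [List.foldl_nil]
      rfl
    · have hm1 : 1 ≤ m := by omega
      set E := (posns start step m).map (fun p => L.getD p 0) with hEdef
      have hElen : E.length = m := by rw [hEdef, List.length_map, hps]
      -- A in write-back form
      have hAeq : sub_sort3 L start step
          = wbp (posns start step m)
              (((List.range (m - 1)).map (fun k : Nat => 1 + k)).foldl passA E) L := by
        unfold sub_sort3
        rw [pyRange_pos_eq (start + step) step n hd0, mcnt_shift start step n hd0, ← hmdef]
        have hmaps : (List.range (m - 1)).map (fun k : Nat => start + step + step * (k : Int))
            = (List.range (m - 1)).map (fun k : Nat => start + step * ((1 + k : Nat) : Int)) := by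
          refine List.map_congr_left ?_
          intro k _
          push_cast
          ring
        rw [hmaps]
        have hL0 : L = wbp (posns start step m) E L := (wbp_self _ _).symm
        conv_lhs => rw [hL0]
        exact outerSim start step hs hd L m hm hmn (m - 1) 1 E le_rfl (by omega) hElen
      -- both subsequences are the sorted permutation of E
      obtain ⟨hWp, hWs⟩ := absInv (m - 1) 1 E le_rfl (by omega) (take_one_pairwise E)
      have hsorteq : ((List.range (m - 1)).map (fun k : Nat => 1 + k)).foldl passA E
          = msortB E :=
        PySem.List.eq_of_perm_of_pairwise_le_of_injective (fun x : Int => x)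
          (fun _ _ h => h) (hWp.trans (msortB_perm E).symm) hWs (msortB_sorted E)
      rw [hAeq, hsorteq, hBwb]
  · -- negative step: both loops are over an empty range
    unfold sub_sort3 sub_sort3_alt
    rw [pyRange_neg_empty (start + step) (L.length : Int) step (by omega) (by omega),
      pyRange_neg_empty start (L.length : Int) step (by omega) hsn]
    simp
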